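-- pv_equiv track=rewrite | github.com/zadacka/advent_of_code_2021 | day15/day15.py | embiggen_risks
-- ===== SOURCE A (Python) =====
-- def embiggen_risks(risks, n=5):
--     rows = len(risks) * n
--     original_rows = len(risks)
--     original_cols = len(risks[0])
--     columns = len(risks[0]) * n
--     mega_risks = [[0] * columns for _ in range(rows)]
--     for row in range(rows):
--         for column in range(columns):
--             r_adjustment, r_idx = divmod(row, original_rows)
--             c_adjustment, c_idx = divmod(column, original_cols)
--             original = risks[r_idx][c_idx]
--             adjusted = original + r_adjustment + c_adjustment
--             mega_risks[row][column] = adjusted - 9 if adjusted > 9 else adjusted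
--     return mega_risks
-- ===== SOURCE B (Python) =====
-- def embiggen_risks(risks, n=5):
--     """Tile-block construction: precompute the per-output-column tile adjustment
--     and each source row repeated n times, then emit each output row in one zip
--     pass with a single combined wrap, instead of a divmod pair per output cell.
--     Equivalent in return value; B builds fresh rows rather than mutating a
--     preallocated grid."""
--     cols = len(risks[0])
--     col_adj = [tile_c for tile_c in range(n) for _ in range(cols)]
--     bases = [row[:cols] * n for row in risks]
--     mega = []
--     for tile_r in range(n):
--         for base in bases:
--             out_row = []
--             for v, tile_c in zip(base, col_adj):
--                 adjusted = v + tile_r + tile_c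
--                 out_row.append(adjusted - 9 if adjusted > 9 else adjusted)
--             mega.append(out_row)
--     return mega
-- ===== Notes on version B (the rewrite author's own statement) =====
-- stated objective: alternative
-- what changed: B builds the mega grid tile-block by tile-block with one combined adjustment per block (appending fresh rows), instead of preallocating a zero grid and computing a divmod pair per output cell.
import Mathlib
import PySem

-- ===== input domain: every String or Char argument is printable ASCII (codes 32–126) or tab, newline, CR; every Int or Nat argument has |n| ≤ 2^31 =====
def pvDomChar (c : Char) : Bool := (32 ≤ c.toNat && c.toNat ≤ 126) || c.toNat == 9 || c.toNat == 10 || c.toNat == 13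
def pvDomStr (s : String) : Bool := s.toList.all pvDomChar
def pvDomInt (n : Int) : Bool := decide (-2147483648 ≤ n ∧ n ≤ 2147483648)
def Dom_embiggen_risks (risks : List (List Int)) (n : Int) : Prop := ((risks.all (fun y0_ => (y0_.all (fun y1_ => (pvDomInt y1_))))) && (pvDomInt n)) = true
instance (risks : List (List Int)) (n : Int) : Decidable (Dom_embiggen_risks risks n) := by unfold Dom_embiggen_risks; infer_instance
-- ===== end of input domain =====

-- B tiles the grid block by block with one combined adjustment per tile (appending fresh
-- rows) instead of preallocating a zero grid and doing a divmod per output cell; same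
-- return value on Pre_ (alternative decomposition, no speed claim).

-- ===== PORT A =====
def embiggen_risks (risks : List (List Int)) (n : Int) : List (List Int) :=
  let rows : Int := (risks.length : Int) * n
  let original_rows : Int := (risks.length : Int)
  let original_cols : Int := ((PySem.List.pyGetD risks 0 []).length : Int)
  let columns : Int := original_cols * n
  let mega0 : List (List Int) :=
    (PySem.List.pyRange 0 rows).map (fun _ => PySem.List.pyRepeat [(0 : Int)] columns)
  (PySem.List.pyRange 0 rows).foldl (fun mega row =>
    (PySem.List.pyRange 0 columns).foldl (fun mega column =>
      let r_adjustment := PySem.Int.floordiv row original_rows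
      let r_idx := PySem.Int.mod row original_rows
      let c_adjustment := PySem.Int.floordiv column original_cols
      let c_idx := PySem.Int.mod column original_cols
      let original := PySem.List.pyGetD (PySem.List.pyGetD risks r_idx []) c_idx 0
      let adjusted := original + r_adjustment + c_adjustment
      mega.modify row.toNat (fun mrow =>
        mrow.set column.toNat (if adjusted > 9 then adjusted - 9 else adjusted))) mega) mega0

-- ===== PORT B =====
def embiggen_risks_alt (risks : List (List Int)) (n : Int) : List (List Int) :=
  let cols : Int := ((PySem.List.pyGetD risks 0 []).length : Int)
  let col_adj : List Int := (PySem.List.pyRange 0 n).flatMap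
    (fun tile_c => (PySem.List.pyRange 0 cols).map (fun _ => tile_c))
  let bases : List (List Int) := risks.map
    (fun row => PySem.List.pyRepeat (PySem.List.slice row none (some cols)) n)
  (PySem.List.pyRange 0 n).foldl (fun mega tile_r =>
    bases.foldl (fun mega base =>
      let out_row := (base.zip col_adj).foldl (fun out_row vc =>
        let adjusted := vc.1 + tile_r + vc.2
        out_row ++ [if adjusted > 9 then adjusted - 9 else adjusted]) ([] : List Int)
      mega ++ [out_row]) mega) []

-- ===== PRECONDITION & SPEC =====
-- Pre_ excludes exactly the inputs on which the Python A raises IndexError: an empty grid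
-- (risks[0] fails), and — only when n > 0 and the first row is nonempty, so that the cell
-- loop actually indexes — ragged grids with a row shorter than the first row.
def Pre_embiggen_risks (risks : List (List Int)) (n : Int) : Prop :=
  risks ≠ [] ∧ (0 < n → 0 < (risks.headD []).length →
    ∀ row ∈ risks, (risks.headD []).length ≤ row.length)
instance (risks : List (List Int)) (n : Int) : Decidable (Pre_embiggen_risks risks n) := by
  unfold Pre_embiggen_risks; infer_instance

def pvWitness_embiggen_risks : List (List Int) × Int := ([[1, 9], [2, 3]], 2)

def Spec_embiggen_risks (risks : List (List Int)) (n : Int) (out : List (List Int)) : Prop := out = embiggen_risks_alt risks n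
instance (risks : List (List Int)) (n : Int) (out : List (List Int)) : Decidable (Spec_embiggen_risks risks n out) := by unfold Spec_embiggen_risks; infer_instance

-- ===== CLAIM (what is proved, stated in full; the proofs are below) =====
def Claim_equal_embiggen_risks : Prop := ∀ (risks : List (List Int)) (n : Int), Dom_embiggen_risks risks n → Pre_embiggen_risks risks n → Spec_embiggen_risks risks n (embiggen_risks risks n)

-- ===== LEMMAS AND PROOFS =====

-- range(0, b) as a List.range
theorem pv_pyRange_zero (b : Int) :
    PySem.List.pyRange 0 b = (List.range b.toNat).map (fun (k : Nat) => (k : Int)) := by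
  rw [PySem.List.pyRange_one]
  simp only [Int.sub_zero, zero_add]

-- (↑a * n).toNat = a * n.toNat
theorem pv_toNat_mul (a : Nat) (n : Int) : ((a : Int) * n).toNat = a * n.toNat := by
  cases n with
  | ofNat m =>
    show ((a : Int) * (m : Int)).toNat = a * m
    rw [← Int.natCast_mul, Int.toNat_natCast]
  | negSucc m =>
    have h1 : (a : Int) * Int.negSucc m ≤ 0 :=
      mul_nonpos_of_nonneg_of_nonpos (Int.natCast_nonneg a) (le_of_lt (Int.negSucc_lt_zero m))
    rw [Int.toNat_of_nonpos h1]; rfl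

-- modify at the junction of an append
theorem pv_modify_append {α : Type} (xs : List α) (y : α) (ys : List α) (f : α → α) :
    (xs ++ y :: ys).modify xs.length f = xs ++ f y :: ys := by
  induction xs with
  | nil => rfl
  | cons x xs ih => simpa using ih

-- a loop of modifies at one fixed index is one modify of the loop
theorem pv_foldl_modify_collapse {α β : Type} (l : List β) (i : Nat) (F : α → β → α)
    (m : List α) :
    l.foldl (fun m c => m.modify i (fun r => F r c)) m = m.modify i (fun r => l.foldl F r) := by
  induction l generalizing m with
  | nil =>
    simp only [List.foldl_nil]
    rw [show (fun (r : α) => r) = @id α from rfl, List.modify_id]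
  | cons c l ih => simp [ih, List.modify_modify_eq, Function.comp_def]

-- a loop of modifies at indices 0..k-1 rewrites the prefix pointwise
theorem pv_foldl_modify_range {α : Type} (H : Nat → α → α) :
    ∀ (k : Nat) (l : List α),
      (List.range k).foldl (fun acc r => acc.modify r (H r)) l
        = (l.take k).mapIdx (fun i a => H i a) ++ l.drop k := by
  intro k
  induction k with
  | zero => intro l; simp
  | succ k ih =>
    intro l
    rw [List.range_succ, List.foldl_append, ih]
    rcases Nat.lt_or_ge k l.length with hk | hk
    · have hdrop : l.drop k = l[k] :: l.drop (k + 1) := (List.getElem_cons_drop hk).symm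
      rw [hdrop]
      have hlen : ((l.take k).mapIdx (fun i a => H i a)).length = k := by
        simp [Nat.min_eq_left (Nat.le_of_lt hk)]
      have hmod := pv_modify_append (List.mapIdx (fun i a => H i a) (List.take k l)) l[k]
        (List.drop (k + 1) l) (H k)
      rw [hlen] at hmod
      have htake : List.take (k + 1) l = List.take k l ++ [l[k]] := by
        rw [List.take_add_one, List.getElem?_eq_getElem hk]; rfl
      rw [List.foldl_cons, List.foldl_nil, hmod, htake, List.mapIdx_append]
      simp [Nat.min_eq_left (Nat.le_of_lt hk)]
    · rw [List.take_of_length_le hk, List.take_of_length_le (Nat.le_succ_of_le hk),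
        List.drop_of_length_le hk, List.drop_of_length_le (Nat.le_succ_of_le hk)]
      simp only [List.append_nil, List.foldl_cons, List.foldl_nil]
      rw [List.modify_eq_self]
      simpa using hk

-- mapIdx over a constant list is a map over the index range
theorem pv_mapIdx_of_const {α β : Type} (l : List α) (z : α) (h : ∀ x ∈ l, x = z)
    (H : Nat → α → β) :
    l.mapIdx (fun i a => H i a) = (List.range l.length).map (fun i => H i z) := by
  apply List.ext_getElem
  · simp
  · intro i h1 h2
    simp only [List.getElem_mapIdx, List.getElem_map, List.getElem_range]
    rw [h _ (l.getElem_mem (by simpa using h1))]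

-- a range over d*m split into m blocks of d
theorem pv_range_mul_flat {α : Type} (d m : Nat) (F : Nat → α) :
    (List.range (d * m)).map F
      = (List.range m).flatMap (fun q => (List.range d).map (fun i => F (q * d + i))) := by
  induction m with
  | zero => simp
  | succ m ih =>
    rw [Nat.mul_succ, List.range_add, List.map_append, ih, List.range_succ,
      List.flatMap_append]
    simp [List.map_map, Function.comp_def, Nat.mul_comm]

-- map over a list as a map over its index range (pyGetD form)
theorem pv_map_eq_range_map {α β : Type} (l : List α) (d : α) (F : α → β) :
    l.map F = (List.range l.length).map (fun (i : Nat) => F (PySem.List.pyGetD l (i : Int) d)) := by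
  conv_lhs => rw [← PySem.List.map_pyGetD_pyRange_zero l d]
  rw [List.map_map, pv_pyRange_zero, List.map_map]
  simp [Function.comp_def, PySem.List.len]

theorem pv_flatMap_congr {α β : Type} {l : List α} {f g : α → List β}
    (h : ∀ x ∈ l, f x = g x) : l.flatMap f = l.flatMap g := by
  rw [List.flatMap_def, List.flatMap_def]
  exact congrArg List.flatten (List.map_congr_left h)

-- writing out a fresh row cell by cell equals a map over the column range
theorem pv_set_range (G : Nat → Int) (K : Nat) :
    (List.range K).foldl (fun mrow c => mrow.set c (G c)) (List.replicate K (0 : Int))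
      = (List.range K).map G := by
  have h1 : (fun (mrow : List Int) (c : Nat) => mrow.set c (G c))
      = fun mrow c => mrow.modify c (fun _ => G c) := by
    funext mrow c
    exact List.set_eq_modify (G c) c mrow
  rw [h1, pv_foldl_modify_range]
  rw [List.take_of_length_le (by simp), List.drop_of_length_le (by simp), List.append_nil]
  rw [pv_mapIdx_of_const _ 0 (fun x hx => List.eq_of_mem_replicate hx)]
  simp

-- writing out the grid row by row equals a map over the row range
theorem pv_grid {α : Type} (R : Nat) (H : Nat → α → α) (z : α) :
    (List.range R).foldl (fun m r => m.modify r (H r)) ((List.range R).map (fun _ => z))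
      = (List.range R).map (fun r => H r z) := by
  rw [pv_foldl_modify_range]
  have hlen : ((List.range R).map (fun (_ : Nat) => z)).length = R := by simp
  rw [List.take_of_length_le (le_of_eq hlen), List.drop_of_length_le (le_of_eq hlen),
    List.append_nil]
  rw [pv_mapIdx_of_const _ z
    (fun x hx => by rcases List.mem_map.mp hx with ⟨a, _, h⟩; exact h.symm)]
  simp

-- the per-cell value of A
def pvCell (risks : List (List Int)) (row col : Int) : Int :=
  let original := PySem.List.pyGetD
    (PySem.List.pyGetD risks (PySem.Int.mod row (risks.length : Int)) [])
    (PySem.Int.mod col ((PySem.List.pyGetD risks 0 []).length : Int)) 0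
  let adjusted := original + PySem.Int.floordiv row (risks.length : Int)
    + PySem.Int.floordiv col ((PySem.List.pyGetD risks 0 []).length : Int)
  if adjusted > 9 then adjusted - 9 else adjusted

-- A in canonical row-major map form
theorem pv_A_eq (risks : List (List Int)) (n : Int) :
    embiggen_risks risks n
      = (List.range (risks.length * n.toNat)).map (fun (r : Nat) =>
          (List.range ((PySem.List.pyGetD risks 0 []).length * n.toNat)).map (fun (c : Nat) =>
            pvCell risks (r : Int) (c : Int))) := by
  unfold embiggen_risks
  simp only [pv_pyRange_zero, pv_toNat_mul, PySem.List.pyRepeat_singleton, List.foldl_map,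
    List.map_map, Function.comp_def, Int.toNat_natCast]
  refine Eq.trans (b := (List.range (risks.length * n.toNat)).foldl
      (fun (mega : List (List Int)) (r : Nat) => mega.modify r (fun mrow =>
        (List.range ((PySem.List.pyGetD risks 0 []).length * n.toNat)).foldl
          (fun mrow c => mrow.set c (pvCell risks (r : Int) (c : Int))) mrow))
      ((List.range (risks.length * n.toNat)).map
        (fun _ => List.replicate ((PySem.List.pyGetD risks 0 []).length * n.toNat) (0 : Int)))) ?_ ?_
  · apply PySem.List.foldl_congr_mem
    intro mega r _
    exact pv_foldl_modify_collapse _ r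
      (fun mrow c => mrow.set c (pvCell risks (r : Int) (c : Int))) mega
  · rw [pv_grid]
    exact List.map_congr_left (fun r _ => pv_set_range _ _)

-- zip of two block lists with matching block lengths, blockwise
theorem pv_zip_flatMap {ι α β : Type} (l : List ι) (f : ι → List α) (g : ι → List β)
    (h : ∀ x ∈ l, (f x).length = (g x).length) :
    (l.flatMap f).zip (l.flatMap g) = l.flatMap (fun x => (f x).zip (g x)) := by
  induction l with
  | nil => simp
  | cons x l ih =>
    simp only [List.flatMap_cons]
    rw [List.zip_append (h x (List.mem_cons_self ..)),
      ih (fun y hy => h y (List.mem_cons_of_mem _ hy))]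

-- one output row of B, written as A's per-tile map
theorem pv_row_eq (row : List Int) (oc m tr : Nat) (h : oc ≤ row.length) :
    (((List.replicate m (row.take oc)).flatten.zip
        ((List.range m).flatMap (fun (tc : Nat) => List.replicate oc ((tc : Nat) : Int)))).map
      (fun vc => if vc.1 + ((tr : Nat) : Int) + vc.2 > 9 then vc.1 + ((tr : Nat) : Int) + vc.2 - 9
        else vc.1 + ((tr : Nat) : Int) + vc.2))
    = (List.range m).flatMap (fun (tc : Nat) => (List.range oc).map (fun (c : Nat) =>
        if PySem.List.pyGetD row (c : Int) 0 + ((tr : Int) + (tc : Int)) > 9 then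
          PySem.List.pyGetD row (c : Int) 0 + ((tr : Int) + (tc : Int)) - 9
        else PySem.List.pyGetD row (c : Int) 0 + ((tr : Int) + (tc : Int)))) := by
  have htake : (row.take oc).length = oc := by simp [h]
  have hflat : (List.replicate m (row.take oc)).flatten
      = (List.range m).flatMap (fun _ => row.take oc) := by
    rw [List.flatMap_def, List.map_const', List.length_range]
  rw [hflat, pv_zip_flatMap _ _ _ (fun x _ => by simp [htake]), List.map_flatMap]
  apply pv_flatMap_congr
  intro tc _
  apply List.ext_getElem
  · simp [htake]
  · intro i h1 h2
    have hio : i < oc := by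
      have := h1
      simp only [List.length_map, List.length_zip, htake, List.length_replicate,
        Nat.min_self] at this
      exact this
    simp only [List.getElem_map, List.getElem_zip, List.getElem_replicate, List.getElem_range,
      List.getElem_take]
    have hget : PySem.List.pyGetD row (i : Int) 0 = row[i]'(lt_of_lt_of_le hio h) := by
      rw [PySem.List.pyGetD_natCast]
      exact List.getD_eq_getElem _ _ _
    rw [hget]
    simp [add_assoc]

-- B in canonical tile flatMap form
theorem pv_B_eq (risks : List (List Int)) (n : Int)
    (hpre : 0 < n → 0 < (PySem.List.pyGetD risks 0 []).length →
      ∀ row ∈ risks, (PySem.List.pyGetD risks 0 []).length ≤ row.length) :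
    embiggen_risks_alt risks n
      = (List.range n.toNat).flatMap (fun (tr : Nat) =>
          risks.map (fun row =>
            (List.range n.toNat).flatMap (fun (tc : Nat) =>
              (List.range (PySem.List.pyGetD risks 0 []).length).map (fun (c : Nat) =>
                if PySem.List.pyGetD row (c : Int) 0 + ((tr : Int) + (tc : Int)) > 9 then
                  PySem.List.pyGetD row (c : Int) 0 + ((tr : Int) + (tc : Int)) - 9
                else
                  PySem.List.pyGetD row (c : Int) 0 + ((tr : Int) + (tc : Int)))))) := by
  unfold embiggen_risks_alt
  simp only [pv_pyRange_zero, List.foldl_map, Int.toNat_natCast, List.map_map,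
    List.flatMap_map, Function.comp_def,
    PySem.List.foldl_append_singleton_eq_map, PySem.List.foldl_append_eq_flatMap,
    List.nil_append, List.map_const', List.length_range]
  apply pv_flatMap_congr
  intro tr htr
  have hn : 0 < n := by
    have := List.mem_range.mp htr
    omega
  apply List.map_congr_left
  intro row hrow
  have hle : (PySem.List.pyGetD risks 0 []).length ≤ row.length ∨
      (PySem.List.pyGetD risks 0 []).length = 0 := by
    rcases Nat.eq_zero_or_pos (PySem.List.pyGetD risks 0 []).length with h0 | h0
    · exact Or.inr h0
    · exact Or.inl (hpre hn h0 row hrow)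
  have hsl : PySem.List.slice row none (some ((PySem.List.pyGetD risks 0 []).length : Int))
      = row.take (PySem.List.pyGetD risks 0 []).length := by
    rw [PySem.List.slice_to row (Int.natCast_nonneg _), Int.toNat_natCast]
  have hrep : PySem.List.pyRepeat (row.take (PySem.List.pyGetD risks 0 []).length) n
      = (List.replicate n.toNat (row.take (PySem.List.pyGetD risks 0 []).length)).flatten := by
    simp [PySem.List.pyRepeat]
  rw [hsl, hrep]
  exact pv_row_eq row _ n.toNat tr (by omega)

theorem pv_main (risks : List (List Int)) (n : Int)
    (hpre : 0 < n → 0 < (PySem.List.pyGetD risks 0 []).length →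
      ∀ row ∈ risks, (PySem.List.pyGetD risks 0 []).length ≤ row.length) :
    embiggen_risks risks n = embiggen_risks_alt risks n := by
  rw [pv_A_eq, pv_B_eq risks n hpre, pv_range_mul_flat risks.length n.toNat]
  apply pv_flatMap_congr
  intro tr _
  rw [pv_map_eq_range_map risks ([] : List Int)]
  apply List.map_congr_left
  intro ri hri
  have hor : ri < risks.length := List.mem_range.mp hri
  rw [pv_range_mul_flat (PySem.List.pyGetD risks 0 []).length n.toNat]
  apply pv_flatMap_congr
  intro tc _
  apply List.map_congr_left
  intro ci hci
  have hoc : ci < (PySem.List.pyGetD risks 0 []).length := List.mem_range.mp hci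
  have h1 : (tr * risks.length + ri) % risks.length = ri := by
    rw [Nat.mul_add_mod_self_right tr risks.length ri]
    exact Nat.mod_eq_of_lt hor
  have h2 : (tr * risks.length + ri) / risks.length = tr := by
    rw [Nat.mul_comm tr risks.length, Nat.mul_add_div (by omega)]
    simp [Nat.div_eq_of_lt hor]
  have h3 : (tc * (PySem.List.pyGetD risks 0 []).length + ci)
      % (PySem.List.pyGetD risks 0 []).length = ci := by
    rw [Nat.mul_add_mod_self_right tc _ ci]
    exact Nat.mod_eq_of_lt hoc
  have h4 : (tc * (PySem.List.pyGetD risks 0 []).length + ci)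
      / (PySem.List.pyGetD risks 0 []).length = tc := by
    rw [Nat.mul_comm tc _, Nat.mul_add_div (by omega)]
    simp [Nat.div_eq_of_lt hoc]
  simp only [pvCell, PySem.Int.mod_natCast, PySem.Int.floordiv_natCast, h1, h2, h3, h4,
    add_assoc]

-- ===== VERDICT (by name: the statement is the Claim_ definition above) =====
theorem embiggen_risks_spec : Claim_equal_embiggen_risks := by
  intro risks n _ hpre
  unfold Spec_embiggen_risks
  apply pv_main risks n
  have hhead : PySem.List.pyGetD risks 0 [] = risks.headD [] := by
    cases risks <;> simp [pysem]
  rw [hhead]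
  exact hpre.2
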